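-- pv_equiv track=rewrite | github.com/diegorodriguezv/aoc | 2022/08.py | from_top
-- ===== SOURCE A (Python) =====
-- def create_vis_map(rows, cols):
--     _map = []
--     for _ in range(rows):
--         _map.append([True] * cols)
--     return _map
--
-- def from_top(_map):
--     rows = len(_map)
--     cols = len(_map[0])
--     _max = [_map[0][col] for col in range(cols)]
--     vis = create_vis_map(rows, cols)
--     for row in range(1, rows - 1):
--         for col in range(1, cols - 1):
--             el = _map[row][col]
--             if el <= _max[col]:
--                 vis[row][col] = False
--             if el > _max[col]:
--                 _max[col] = el
--     return vis
-- ===== SOURCE B (Python) =====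
-- def from_top(_map):
--     rows = len(_map)
--     cols = len(_map[0])
--     return [[row == 0 or row == rows - 1 or col == 0 or col == cols - 1
--              or _map[row][col] > max(_map[i][col] for i in range(row))
--              for col in range(cols)]
--             for row in range(rows)]
-- ===== Notes on version B (the rewrite author's own statement) =====
-- stated objective: alternative
-- what changed: Replaces A's stateful forward pass (mutated visibility grid plus a maintained running column-maximum list) by a direct per-cell comprehension that rescans the column above each interior cell for its maximum; border cells are True by the guard instead of being left untouched.
import Mathlib
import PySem

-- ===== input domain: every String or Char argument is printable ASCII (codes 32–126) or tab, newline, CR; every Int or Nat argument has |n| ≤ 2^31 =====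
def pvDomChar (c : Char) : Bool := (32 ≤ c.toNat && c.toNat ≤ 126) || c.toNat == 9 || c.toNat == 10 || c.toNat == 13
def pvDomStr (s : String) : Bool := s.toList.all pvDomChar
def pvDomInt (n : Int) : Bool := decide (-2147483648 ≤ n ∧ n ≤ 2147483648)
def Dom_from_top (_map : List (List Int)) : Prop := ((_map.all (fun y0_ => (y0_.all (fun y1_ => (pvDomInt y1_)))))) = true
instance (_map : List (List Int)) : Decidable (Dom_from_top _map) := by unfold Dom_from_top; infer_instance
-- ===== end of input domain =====

-- B replaces A's single forward pass with a mutated visibility grid and a maintained running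
-- column-maximum list by a direct per-cell comprehension that rescans the whole column above
-- each interior cell (objective: alternative decomposition; not faster).

-- ===== PORT A =====
-- vis[row][col] = x   (list-of-lists element assignment)
def set2 (v : List (List Bool)) (r c : Nat) (x : Bool) : List (List Bool) :=
  v.set r ((v.getD r []).set c x)

-- helper create_vis_map: append a row of [True] * cols, rows times
def create_vis_map (rows cols : Nat) : List (List Bool) :=
  (List.range rows).foldl (fun m _ => m ++ [List.replicate cols true]) []

-- body of A's inner 'for col' loop (state = (_max, vis)); indices are the nonnegative Python
-- loop indices, and _map[row][col] is read via getD (exact on in-range reads, which Pre_ gives)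
def stepCell (_map : List (List Int)) (row : Nat) (st : List Int × List (List Bool)) (col : Nat) :
    List Int × List (List Bool) :=
  let el := (_map.getD row []).getD col 0
  let st1 := if el ≤ st.1.getD col 0 then (st.1, set2 st.2 row col false) else st
  if el > st1.1.getD col 0 then (st1.1.set col el, st1.2) else st1

def from_top (_map : List (List Int)) : List (List Bool) :=
  let rows := _map.length
  let cols := (_map.headD []).length
  let max0 := (List.range cols).map (fun col => (_map.headD []).getD col 0)
  let vis := create_vis_map rows cols
  let st := (List.range' 1 (rows - 2)).foldl
      (fun st row => (List.range' 1 (cols - 2)).foldl (stepCell _map row) st) (max0, vis)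
  st.2

-- ===== PORT B =====
-- max(_map[i][col] for i in range(row))  (only evaluated behind the row ≥ 1 guard)
def colMaxB (_map : List (List Int)) (row col : Nat) : Int :=
  (PySem.List.max? ((List.range row).map (fun i => (_map.getD i []).getD col 0)) (fun x => x)).getD 0

def from_top_alt (_map : List (List Int)) : List (List Bool) :=
  let rows := _map.length
  let cols := (_map.headD []).length
  (List.range rows).map (fun row =>
    (List.range cols).map (fun col =>
      decide (row = 0) || decide (row = rows - 1) || decide (col = 0) || decide (col = cols - 1) ||
      decide ((_map.getD row []).getD col 0 > colMaxB _map row col)))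

-- ===== PRECONDITION & SPEC =====
-- Exactly where Python A returns without raising: _map nonempty (A reads len(_map[0])), and each
-- interior row long enough for the interior-column reads _map[row][col], col ≤ cols-2 (the bound
-- is vacuous when cols < 3, where the inner loop is empty).
def Pre_from_top (_map : List (List Int)) : Prop :=
  _map ≠ [] ∧ ∀ i ∈ List.range _map.length, 1 ≤ i → i + 1 < _map.length →
    3 ≤ (_map.headD []).length → (_map.headD []).length ≤ (_map.getD i []).length + 1
instance (_map : List (List Int)) : Decidable (Pre_from_top _map) := by unfold Pre_from_top; infer_instance
def pvWitness_from_top : List (List Int) := [[1, 2, 3], [2, 1, 4], [0, 0, 0]]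
def Spec_from_top (_map : List (List Int)) (out : List (List Bool)) : Prop := out = from_top_alt _map
instance (_map : List (List Int)) (out : List (List Bool)) : Decidable (Spec_from_top _map out) := by unfold Spec_from_top; infer_instance

-- ===== CLAIM (what is proved, stated in full; the proofs are below) =====
def Claim_equal_from_top : Prop := ∀ (_map : List (List Int)), Dom_from_top _map → Pre_from_top _map → Spec_from_top _map (from_top _map)

-- ===== LEMMAS AND PROOFS =====

-- _map[r][c] with defaults (how both ports read cells)
def pvG (_map : List (List Int)) (r c : Nat) : Int := (_map.getD r []).getD c 0

-- prefix column maximum over rows 0..k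
def pvPM (_map : List (List Int)) (k c : Nat) : Int :=
  ((List.range k).map (fun i => pvG _map (i + 1) c)).foldl max (pvG _map 0 c)

theorem pvPM_succ (_map : List (List Int)) (k c : Nat) :
    pvPM _map (k + 1) c = max (pvPM _map k c) (pvG _map (k + 1) c) := by
  simp [pvPM, List.range_succ]

theorem colMaxB_eq_pvPM (_map : List (List Int)) (r c : Nat) (hr : 1 ≤ r) :
    colMaxB _map r c = pvPM _map (r - 1) c := by
  obtain ⟨k, rfl⟩ : ∃ k, r = k + 1 := ⟨r - 1, by omega⟩
  simp only [colMaxB, List.range_succ_eq_map, List.map_cons, List.map_map,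
    PySem.List.max?_id_cons, Option.getD_some, Nat.add_sub_cancel]
  unfold pvPM pvG
  congr 1

theorem pv_getD_set_self {α : Type} (l : List α) (i : Nat) (x d : α) :
    (l.set i x).getD i d = if i < l.length then x else d := by
  by_cases h : i < l.length
  · simp [List.getD_eq_getElem?_getD, List.getElem?_set_self', h]
  · rw [if_neg h]
    rw [List.getD_eq_default _ _ (by simp only [List.length_set]; omega)]

theorem pv_getD_set_ne {α : Type} (l : List α) {i j : Nat} (x d : α) (h : i ≠ j) :
    (l.set i x).getD j d = l.getD j d := by
  simp [List.getD_eq_getElem?_getD, List.getElem?_set_ne h]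

-- the running-max state after A has processed rows 1..k
def mState (_map : List (List Int)) (k : Nat) : List Int :=
  (List.range (_map.headD []).length).map
    (fun c => if 1 ≤ c ∧ c + 1 < (_map.headD []).length then pvPM _map k c else pvG _map 0 c)

-- the visibility grid after A has processed rows 1..k
def visState (_map : List (List Int)) (k : Nat) : List (List Bool) :=
  (List.range _map.length).map (fun r =>
    (List.range (_map.headD []).length).map (fun c =>
      if 1 ≤ r ∧ r ≤ k ∧ 1 ≤ c ∧ c + 1 < (_map.headD []).length then
        decide (pvG _map r c > pvPM _map (r - 1) c) else true))

theorem mState_length (_map : List (List Int)) (k : Nat) :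
    (mState _map k).length = (_map.headD []).length := by simp [mState]

theorem mState_getD (_map : List (List Int)) (k c : Nat) (hc : c < (_map.headD []).length) :
    (mState _map k).getD c 0 =
      if 1 ≤ c ∧ c + 1 < (_map.headD []).length then pvPM _map k c else pvG _map 0 c := by
  unfold mState; rw [PySem.List.getD_map_range _ _ _ _ hc]

theorem visState_length (_map : List (List Int)) (k : Nat) :
    (visState _map k).length = _map.length := by simp [visState]

theorem visState_getD (_map : List (List Int)) (k r : Nat) (hr : r < _map.length) :
    (visState _map k).getD r [] =
      (List.range (_map.headD []).length).map (fun c =>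
        if 1 ≤ r ∧ r ≤ k ∧ 1 ≤ c ∧ c + 1 < (_map.headD []).length then
          decide (pvG _map r c > pvPM _map (r - 1) c) else true) := by
  unfold visState; rw [PySem.List.getD_map_range _ _ _ _ hr]

theorem inner_fst (_map : List (List Int)) (ρ : Nat) (cs : List Nat) :
    ∀ st : List Int × List (List Bool),
      (cs.foldl (stepCell _map ρ) st).1 =
        cs.foldl (fun m c => if pvG _map ρ c > m.getD c 0 then m.set c (pvG _map ρ c) else m) st.1 := by
  induction cs with
  | nil => intro st; rfl
  | cons c cs ih =>
    intro st
    simp only [List.foldl_cons]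
    rw [ih]
    congr 1
    simp only [stepCell, pvG]
    split_ifs <;> simp_all

theorem pv_step_eq (_map : List (List Int)) (ρ c : Nat) (m : List Int) (v : List (List Bool)) :
    stepCell _map ρ (m, v) c =
      (if pvG _map ρ c > m.getD c 0 then m.set c (pvG _map ρ c) else m,
       if pvG _map ρ c ≤ m.getD c 0 then set2 v ρ c false else v) := by
  simp only [stepCell, pvG]
  split_ifs <;> simp_all

theorem inner_snd (_map : List (List Int)) (ρ : Nat) (cs : List Nat) :
    ∀ (m : List Int) (v : List (List Bool)), cs.Nodup → (∀ c ∈ cs, c < m.length) →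
      (cs.foldl (stepCell _map ρ) (m, v)).2 =
        cs.foldl (fun v c => if pvG _map ρ c ≤ m.getD c 0 then set2 v ρ c false else v) v := by
  induction cs with
  | nil => intro m v _ _; rfl
  | cons c cs ih =>
    intro m v hnd hlen
    simp only [List.foldl_cons]
    rw [pv_step_eq]
    have hlen1 : (if pvG _map ρ c > m.getD c 0 then m.set c (pvG _map ρ c) else m).length = m.length := by
      split <;> simp
    rw [ih _ _ hnd.of_cons (by intro x hx; rw [hlen1]; exact hlen x (List.mem_cons_of_mem _ hx))]
    apply PySem.List.foldl_congr_mem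
    intro acc x hx
    have hxc : c ≠ x := fun h => (List.nodup_cons.mp hnd).1 (h ▸ hx)
    have : (if pvG _map ρ c > m.getD c 0 then m.set c (pvG _map ρ c) else m).getD x 0 = m.getD x 0 := by
      split
      · exact pv_getD_set_ne _ _ _ hxc
      · rfl
    rw [this]

theorem fold_max_getD (f : Nat → Int) (cs : List Nat) :
    ∀ (m : List Int) (c' : Nat), cs.Nodup →
      (cs.foldl (fun m c => if f c > m.getD c 0 then m.set c (f c) else m) m).getD c' 0 =
        if c' ∈ cs ∧ c' < m.length then max (m.getD c' 0) (f c') else m.getD c' 0 := by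
  induction cs with
  | nil => intro m c' _; simp
  | cons c cs ih =>
    intro m c' hnd
    simp only [List.foldl_cons]
    rw [ih _ _ hnd.of_cons]
    have hlen1 : (if f c > m.getD c 0 then m.set c (f c) else m).length = m.length := by
      split <;> simp
    by_cases hc : c' = c
    · subst hc
      have hnotin : c' ∉ cs := (List.nodup_cons.mp hnd).1
      simp only [hnotin, false_and, if_false, List.mem_cons, true_or, true_and]
      by_cases hlt : c' < m.length
      · rw [if_pos hlt]
        split_ifs with hgt
        · rw [pv_getD_set_self, if_pos hlt]; omega
        · omega
      · rw [if_neg hlt]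
        split_ifs with hgt
        · rw [pv_getD_set_self, if_neg hlt]
          rw [List.getD_eq_default _ _ (by omega)]
        · rfl
    · have hmem : (c' ∈ c :: cs) ↔ c' ∈ cs := by simp [hc]
      have hD : (if f c > m.getD c 0 then m.set c (f c) else m).getD c' 0 = m.getD c' 0 := by
        split
        · exact pv_getD_set_ne _ _ _ (fun h => hc h.symm)
        · rfl
      rw [hlen1, hD]
      simp [hc]

theorem fold_max_length (f : Nat → Int) (cs : List Nat) :
    ∀ m : List Int,
      (cs.foldl (fun m c => if f c > m.getD c 0 then m.set c (f c) else m) m).length = m.length := by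
  induction cs with
  | nil => intro m; rfl
  | cons c cs ih => intro m; simp only [List.foldl_cons]; rw [ih]; split <;> simp

theorem fold_row_getD (Q : Nat → Prop) [DecidablePred Q] (cs : List Nat) :
    ∀ (rw0 : List Bool) (c' : Nat) (d : Bool), cs.Nodup →
      (cs.foldl (fun rw c => if Q c then rw.set c false else rw) rw0).getD c' d =
        if c' ∈ cs ∧ Q c' ∧ c' < rw0.length then false else rw0.getD c' d := by
  induction cs with
  | nil => intro rw0 c' d _; simp
  | cons c cs ih =>
    intro rw0 c' d hnd
    simp only [List.foldl_cons]
    rw [ih _ _ _ hnd.of_cons]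
    have hlen1 : (if Q c then rw0.set c false else rw0).length = rw0.length := by
      split <;> simp
    by_cases hc : c' = c
    · subst hc
      have hnotin : c' ∉ cs := (List.nodup_cons.mp hnd).1
      rw [if_neg (fun h => hnotin h.1)]
      by_cases hq : Q c'
      · rw [if_pos hq, pv_getD_set_self]
        by_cases hlt : c' < rw0.length
        · rw [if_pos hlt, if_pos ⟨List.mem_cons_self, hq, hlt⟩]
        · rw [if_neg hlt, if_neg (fun h => hlt h.2.2),
            List.getD_eq_default _ _ (Nat.le_of_not_lt hlt)]
      · rw [if_neg hq, if_neg (fun h => hq h.2.1)]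
    · have hD : (if Q c then rw0.set c false else rw0).getD c' d = rw0.getD c' d := by
        split
        · exact pv_getD_set_ne _ _ _ (fun h => hc h.symm)
        · rfl
      rw [hlen1, hD]
      simp [hc]

theorem fold_row_length (Q : Nat → Prop) [DecidablePred Q] (cs : List Nat) :
    ∀ rw0 : List Bool,
      (cs.foldl (fun rw c => if Q c then rw.set c false else rw) rw0).length = rw0.length := by
  induction cs with
  | nil => intro rw0; rfl
  | cons c cs ih => intro rw0; simp only [List.foldl_cons]; rw [ih]; split <;> simp

theorem fold_set2 (Q : Nat → Prop) [DecidablePred Q] (ρ : Nat) (cs : List Nat) :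
    ∀ v : List (List Bool),
      cs.foldl (fun v c => if Q c then set2 v ρ c false else v) v =
        v.set ρ (cs.foldl (fun rw c => if Q c then rw.set c false else rw) (v.getD ρ [])) := by
  induction cs with
  | nil =>
    intro v
    simp only [List.foldl_nil]
    by_cases h : ρ < v.length
    · rw [List.getD_eq_getElem _ _ h, List.set_getElem_self]
    · rw [List.set_eq_of_length_le (by omega)]
  | cons c cs ih =>
    intro v
    simp only [List.foldl_cons]
    rw [ih]
    by_cases hq : Q c
    · simp only [if_pos hq]
      have h1 : (set2 v ρ c false).getD ρ [] = (v.getD ρ []).set c false := by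
        unfold set2
        rw [pv_getD_set_self]
        by_cases h : ρ < v.length
        · rw [if_pos h]
        · rw [if_neg h, List.getD_eq_default _ _ (by omega)]
          rfl
      rw [h1]
      unfold set2
      rw [List.set_set]
    · simp only [if_neg hq]

theorem nodup_cols (n : Nat) : (List.range' 1 n).Nodup := List.nodup_range' 1

theorem inner_row (_map : List (List Int)) (k : Nat) (hρ : k + 1 < _map.length) :
    (List.range' 1 ((_map.headD []).length - 2)).foldl (stepCell _map (k + 1))
        (mState _map k, visState _map k) = (mState _map (k + 1), visState _map (k + 1)) := by
  have hC : ∀ c ∈ List.range' 1 ((_map.headD []).length - 2), c < (mState _map k).length := by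
    intro c hc
    rw [mState_length]
    rw [List.mem_range'_1] at hc
    omega
  have h1 : (List.foldl (stepCell _map (k + 1)) (mState _map k, visState _map k)
      (List.range' 1 ((_map.headD []).length - 2))).1 = mState _map (k + 1) := by
    rw [inner_fst]
    apply List.ext_getElem
    · rw [fold_max_length, mState_length, mState_length]
    · intro i hi1 hi2
      have hiC : i < (_map.headD []).length := by
        rw [mState_length] at hi2; exact hi2
      rw [← List.getD_eq_getElem _ 0 hi1, ← List.getD_eq_getElem _ 0 hi2]
      rw [fold_max_getD _ _ _ _ (nodup_cols _), mState_length, mState_getD _ _ _ hiC,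
        mState_getD _ _ _ hiC]
      by_cases hint : 1 ≤ i ∧ i + 1 < (_map.headD []).length
      · have hmem : i ∈ List.range' 1 ((_map.headD []).length - 2) := by
          rw [List.mem_range'_1]; omega
        rw [if_pos ⟨hmem, hiC⟩, if_pos hint, if_pos hint]
        exact (pvPM_succ _map k i).symm
      · have hnmem : i ∉ List.range' 1 ((_map.headD []).length - 2) := by
          intro hm; rw [List.mem_range'_1] at hm; omega
        rw [if_neg (fun hh => hnmem hh.1), if_neg hint, if_neg hint]
  have h2 : (List.foldl (stepCell _map (k + 1)) (mState _map k, visState _map k)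
      (List.range' 1 ((_map.headD []).length - 2))).2 = visState _map (k + 1) := by
    rw [inner_snd _ _ _ _ _ (nodup_cols _) hC]
    rw [fold_set2]
    apply List.ext_getElem
    · rw [List.length_set, visState_length, visState_length]
    · intro r hr1 hr2
      have hrR : r < _map.length := by rw [visState_length] at hr2; exact hr2
      rw [← List.getD_eq_getElem _ [] hr1, ← List.getD_eq_getElem _ [] hr2]
      by_cases hrρ : r = k + 1
      · subst hrρ
        rw [pv_getD_set_self, if_pos (by rw [visState_length]; exact hρ)]
        rw [visState_getD _map k (k + 1) hrR]
        rw [visState_getD _map (k + 1) (k + 1) hrR]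
        apply List.ext_getElem
        · rw [fold_row_length]
          simp
        · intro c hc1 hc2
          have hcC : c < (_map.headD []).length := by simpa using hc2
          rw [← List.getD_eq_getElem _ true hc1, ← List.getD_eq_getElem _ true hc2]
          rw [fold_row_getD _ _ _ _ _ (nodup_cols _)]
          rw [PySem.List.getD_map_range _ _ _ _ hcC, PySem.List.getD_map_range _ _ _ _ hcC]
          have hrow : ¬ (1 ≤ k + 1 ∧ k + 1 ≤ k ∧ 1 ≤ c ∧ c + 1 < (_map.headD []).length) := by
            omega
          rw [if_neg hrow]
          by_cases hint : 1 ≤ c ∧ c + 1 < (_map.headD []).length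
          · have hmem : c ∈ List.range' 1 ((_map.headD []).length - 2) := by
              rw [List.mem_range'_1]; omega
            have hQ := mState_getD _map k c hcC
            rw [if_pos hint] at hQ
            by_cases hle : pvG _map (k + 1) c ≤ (mState _map k).getD c 0
            · rw [if_pos ⟨hmem, hle, by simpa using hcC⟩]
              rw [if_pos ⟨by omega, by omega, hint.1, hint.2⟩]
              rw [hQ] at hle
              simp only [Nat.add_sub_cancel]
              symm
              simp only [decide_eq_false_iff_not]
              omega
            · rw [if_neg (fun hh => hle hh.2.1)]
              rw [if_pos ⟨by omega, by omega, hint.1, hint.2⟩]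
              rw [hQ] at hle
              simp only [Nat.add_sub_cancel]
              symm
              simp only [decide_eq_true_eq]
              omega
          · have hnmem : c ∉ List.range' 1 ((_map.headD []).length - 2) := by
              intro hm; rw [List.mem_range'_1] at hm; omega
            rw [if_neg (fun hh => hnmem hh.1), if_neg (fun hh => hint ⟨hh.2.2.1, hh.2.2.2⟩)]
      · rw [pv_getD_set_ne _ _ _ (fun h => hrρ h.symm)]
        rw [visState_getD _map k r hrR, visState_getD _map (k + 1) r hrR]
        apply List.map_congr_left
        intro c hc
        split_ifs <;> first | rfl | omega
  calc List.foldl (stepCell _map (k + 1)) (mState _map k, visState _map k)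
        (List.range' 1 ((_map.headD []).length - 2))
      = ((List.foldl (stepCell _map (k + 1)) (mState _map k, visState _map k)
          (List.range' 1 ((_map.headD []).length - 2))).1,
         (List.foldl (stepCell _map (k + 1)) (mState _map k, visState _map k)
          (List.range' 1 ((_map.headD []).length - 2))).2) := rfl
    _ = (mState _map (k + 1), visState _map (k + 1)) := by rw [h1, h2]

theorem outer_inv (_map : List (List Int)) (k : Nat) (hk : k ≤ _map.length - 2) :
    (List.range' 1 k).foldl
        (fun st row => (List.range' 1 ((_map.headD []).length - 2)).foldl (stepCell _map row) st)
        (mState _map 0, visState _map 0) = (mState _map k, visState _map k) := by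
  induction k with
  | zero => rfl
  | succ k ih =>
    rw [List.range'_concat, List.foldl_append, ih (by omega)]
    simp only [List.foldl_cons, List.foldl_nil]
    have h1 : 1 + 1 * k = k + 1 := by omega
    rw [h1]
    exact inner_row _map k (by omega)

theorem init_max (_map : List (List Int)) :
    (List.range (_map.headD []).length).map (fun col => (_map.headD []).getD col 0) =
      mState _map 0 := by
  unfold mState
  apply List.map_congr_left
  intro c _
  have hpm : pvPM _map 0 c = pvG _map 0 c := rfl
  have hg : (_map.headD []).getD c 0 = pvG _map 0 c := by
    unfold pvG; cases _map <;> rfl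
  split_ifs
  · rw [hg, hpm]
  · exact hg

theorem create_eq (rows cols : Nat) :
    create_vis_map rows cols = List.replicate rows (List.replicate cols true) := by
  induction rows with
  | zero => rfl
  | succ n ih =>
    unfold create_vis_map at *
    rw [List.range_succ, List.foldl_append, ih]
    simp [List.replicate_succ']

theorem init_vis (_map : List (List Int)) :
    create_vis_map _map.length (_map.headD []).length = visState _map 0 := by
  rw [create_eq]
  symm
  rw [List.eq_replicate_iff]
  constructor
  · simp [visState]
  · intro b hb
    unfold visState at hb
    rcases List.mem_map.mp hb with ⟨r, _, rfl⟩
    rw [List.eq_replicate_iff]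
    constructor
    · simp
    · intro x hx
      rcases List.mem_map.mp hx with ⟨c, _, rfl⟩
      split_ifs with h
      · omega
      · rfl

-- ===== VERDICT (by name: the statement is the Claim_ definition above) =====
theorem from_top_spec : Claim_equal_from_top := by
  intro _map _ _
  unfold Spec_from_top
  show from_top _map = from_top_alt _map
  simp only [from_top, from_top_alt]
  rw [init_max, init_vis, outer_inv _ _ (le_refl _)]
  show visState _map (_map.length - 2) = _
  unfold visState
  apply List.map_congr_left
  intro r hr
  rw [List.mem_range] at hr
  apply List.map_congr_left
  intro c hc
  rw [List.mem_range] at hc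
  split_ifs with h
  · obtain ⟨h1, h2, h3, h4⟩ := h
    rw [colMaxB_eq_pvPM _ _ _ h1]
    have e0 : ¬ (r = 0) := by omega
    have e1 : ¬ (r = _map.length - 1) := by omega
    have e2 : ¬ (c = 0) := by omega
    have hhd : _map.head?.getD [] = _map.headD [] := by cases _map <;> rfl
    have e3' : ¬ (c = (_map.head?.getD []).length - 1) := by rw [hhd]; omega
    simp [e0, e1, e2, e3', pvG]
  · by_cases h0 : r = 0
    · simp [h0]
    · by_cases h1 : r = _map.length - 1
      · simp [h1]
      · by_cases h2 : c = 0
        · simp [h2]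
        · by_cases h3 : c = (_map.headD []).length - 1
          · simp [h3]
          · exact absurd ⟨by omega, by omega, by omega, by omega⟩ h
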